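-- pv_equiv track=rewrite | github.com/neucast/dgef-data-science | exercises/module4_part_2/src/PixelConverter.py | pixelToMatrix
-- ===== SOURCE A (Python) =====
-- def pixelToMatrix(A):
--     M = []
--     n = len(A)
--     m = len(A[0])
--     for i in range(n):
--         vaux1 = []
--         vaux2 = []
--         vaux3 = []
--         for j in range(m):
--             vaux1.extend([A[i][j][0]])
--             vaux2.extend([A[i][j][1]])
--             vaux3.extend([A[i][j][2]])
--         M.extend([vaux1])
--         M.extend([vaux2])
--         M.extend([vaux3])
--     return M
-- ===== SOURCE B (Python) =====
-- def pixelToMatrix(A):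
--     m = len(A[0])
--     return [[A[k // 3][j][k % 3] for j in range(m)] for k in range(3 * len(A))]
-- ===== Notes on version B (the rewrite author's own statement) =====
-- stated objective: simpler
-- what changed: Replaces A's nested accumulator loops (three channel lists grown element by element per row, then appended) with one flat comprehension over range(3*len(A)) that computes output row k directly as channel k%3 of input row k//3; Pre_ excludes empty A and rows shorter than the first row, where A raises IndexError.
import Mathlib
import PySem

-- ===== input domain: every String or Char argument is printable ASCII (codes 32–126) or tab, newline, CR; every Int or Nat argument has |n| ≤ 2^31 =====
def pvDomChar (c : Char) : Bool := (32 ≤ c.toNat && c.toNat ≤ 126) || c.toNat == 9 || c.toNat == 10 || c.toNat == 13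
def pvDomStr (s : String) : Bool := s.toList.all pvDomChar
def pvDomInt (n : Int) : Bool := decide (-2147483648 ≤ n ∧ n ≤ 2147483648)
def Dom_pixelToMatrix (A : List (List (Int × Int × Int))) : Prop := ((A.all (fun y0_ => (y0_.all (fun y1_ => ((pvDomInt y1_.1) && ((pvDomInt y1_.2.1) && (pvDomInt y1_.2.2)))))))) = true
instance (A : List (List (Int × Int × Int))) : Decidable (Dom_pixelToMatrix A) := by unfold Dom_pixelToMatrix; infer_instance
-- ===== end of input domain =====

-- B builds the output matrix directly: output row k is channel k%3 of input row k//3,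
-- one flat comprehension over range(3*len(A)) instead of A's nested accumulator loops; objective: simpler.

-- ===== PORT A =====
def pixelToMatrix (A : List (List (Int × Int × Int))) : List (List Int) :=
  let n := PySem.List.len A
  let m := PySem.List.len (PySem.List.pyGetD A 0 [])   -- A[0]: IndexError on empty A (outside Pre_)
  (PySem.List.pyRange 0 n 1).foldl (fun M i =>
    let row := PySem.List.pyGetD A i []
    let v := (PySem.List.pyRange 0 m 1).foldl
      (fun (v : List Int × List Int × List Int) j =>
        let p := PySem.List.pyGetD row j (0, 0, 0)     -- A[i][j]: IndexError when row shorter than m (outside Pre_)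
        (v.1 ++ [p.1], v.2.1 ++ [p.2.1], v.2.2 ++ [p.2.2]))
      ([], [], [])
    M ++ [v.1] ++ [v.2.1] ++ [v.2.2]) []

-- ===== PORT B =====
def pixelToMatrix_alt (A : List (List (Int × Int × Int))) : List (List Int) :=
  let m := PySem.List.len (PySem.List.pyGetD A 0 [])   -- len(A[0]): IndexError on empty A (outside Pre_)
  (PySem.List.pyRange 0 (3 * PySem.List.len A) 1).map (fun k =>
    (PySem.List.pyRange 0 m 1).map (fun j =>
      -- A[k // 3][j][k % 3]; tuple indexing p[c] for c ∈ {0,1,2} ported as the exact projection chain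
      let p := PySem.List.pyGetD (PySem.List.pyGetD A (PySem.Int.floordiv k 3) []) j (0, 0, 0)
      if PySem.Int.mod k 3 = 0 then p.1 else if PySem.Int.mod k 3 = 1 then p.2.1 else p.2.2))

-- ===== PRECONDITION & SPEC =====
-- Pre_ excludes exactly the inputs on which Python A raises IndexError:
-- empty A (A[0]) and rows shorter than the first row (A[i][j] with j < m).
def Pre_pixelToMatrix (A : List (List (Int × Int × Int))) : Prop :=
  A ≠ [] ∧ ∀ r ∈ A, (A.headD []).length ≤ r.length
instance (A : List (List (Int × Int × Int))) : Decidable (Pre_pixelToMatrix A) := by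
  unfold Pre_pixelToMatrix; infer_instance
def pvWitness_pixelToMatrix : (List (List (Int × Int × Int))) :=
  [[(1, 2, 3), (4, 5, 6)], [(7, 8, 9), (10, 11, 12)]]

def Spec_pixelToMatrix (A : List (List (Int × Int × Int))) (out : List (List Int)) : Prop := out = pixelToMatrix_alt A
instance (A : List (List (Int × Int × Int))) (out : List (List Int)) : Decidable (Spec_pixelToMatrix A out) := by unfold Spec_pixelToMatrix; infer_instance

-- ===== CLAIM (what is proved, stated in full; the proofs are below) =====
def Claim_equal_pixelToMatrix : Prop := ∀ (A : List (List (Int × Int × Int))), Dom_pixelToMatrix A → Pre_pixelToMatrix A → Spec_pixelToMatrix A (pixelToMatrix A)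

-- ===== LEMMAS AND PROOFS =====

-- A's inner index loop over range(m) equals the three channel maps of the row's first m pixels
theorem pv_inner (r : List (Int × Int × Int)) (m : Nat) (h : m ≤ r.length) :
    (PySem.List.pyRange 0 (m : Int) 1).foldl
      (fun (v : List Int × List Int × List Int) j =>
        let p := PySem.List.pyGetD r j (0, 0, 0)
        (v.1 ++ [p.1], v.2.1 ++ [p.2.1], v.2.2 ++ [p.2.2])) ([], [], [])
    = ((r.take m).map (·.1), (r.take m).map (·.2.1), (r.take m).map (·.2.2)) := by
  induction m with
  | zero => simp
  | succ k ih =>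
    have hk : k ≤ r.length := Nat.le_of_succ_le h
    have hlt : k < r.length := h
    have hsplit : PySem.List.pyRange 0 ((k + 1 : Nat) : Int) 1
        = PySem.List.pyRange 0 (k : Int) 1 ++ [(k : Int)] := by
      have := PySem.List.pyRange_one_succ_right (a := 0) (b := (k : Int)) (Int.natCast_nonneg k)
      push_cast
      push_cast at this
      exact this
    rw [hsplit, List.foldl_append, ih hk]
    have hget : PySem.List.pyGetD r ((k : Int)) (0, 0, 0) = r[k] := by
      rw [PySem.List.pyGetD_natCast]
      simp [List.getD_eq_getElem?_getD, List.getElem?_eq_getElem hlt]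
    have htake : r.take (k + 1) = r.take k ++ [r[k]] := by
      rw [List.take_add_one]
      simp [List.getElem?_eq_getElem hlt]
    simp only [List.foldl_cons, List.foldl_nil, htake, List.map_append, List.map_cons,
      List.map_nil, hget]

-- B's comprehension over range(m) of xs[j] applied to a channel selector equals mapping it over take m
theorem pv_takeMap {β : Type} (r : List (Int × Int × Int)) (m : Nat) (h : m ≤ r.length)
    (f : (Int × Int × Int) → β) :
    (PySem.List.pyRange 0 (m : Int) 1).map (fun j => f (PySem.List.pyGetD r j (0, 0, 0)))
    = (r.take m).map f := by
  have hlen : (r.take m).length = m := by simp [Nat.min_eq_left h]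
  have base := PySem.List.map_pyGetD_pyRange_zero (xs := r.take m) (d := ((0, 0, 0) : Int × Int × Int))
  rw [PySem.List.len_eq, hlen] at base
  calc (PySem.List.pyRange 0 (m : Int) 1).map (fun j => f (PySem.List.pyGetD r j (0, 0, 0)))
      = (PySem.List.pyRange 0 (m : Int) 1).map
          (fun j => f (PySem.List.pyGetD (r.take m) j (0, 0, 0))) := by
        apply List.map_congr_left
        intro j hj
        rw [PySem.List.mem_pyRange_one] at hj
        congr 1
        rw [PySem.List.pyGetD_eq_getElem r (0, 0, 0) hj.1 (by omega),
            PySem.List.pyGetD_eq_getElem (r.take m) (0, 0, 0) hj.1 (by rw [hlen]; exact_mod_cast hj.2),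
            List.getElem_take]
    _ = ((PySem.List.pyRange 0 (m : Int) 1).map
          (fun j => PySem.List.pyGetD (r.take m) j (0, 0, 0))).map f := by
        rw [List.map_map]; rfl
    _ = (r.take m).map f := by rw [base]

-- B's outer comprehension over range(3·|A|), keyed by k//3 and k%3, is a flatMap over the rows
theorem pv_outer {β : Type} (A : List (List (Int × Int × Int)))
    (g : List (Int × Int × Int) → Int → β) :
    (PySem.List.pyRange 0 (3 * (A.length : Int)) 1).map
      (fun k => g (PySem.List.pyGetD A (PySem.Int.floordiv k 3) []) (PySem.Int.mod k 3))
    = A.flatMap (fun row => [g row 0, g row 1, g row 2]) := by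
  induction A using List.reverseRecOn with
  | nil => simp [PySem.List.pyRange_one_eq_nil]
  | append_singleton A r ih =>
    have hn : ((A ++ [r]).length : Int) = (A.length : Int) + 1 := by simp
    have hsplit : PySem.List.pyRange 0 (3 * ((A ++ [r]).length : Int)) 1
        = PySem.List.pyRange 0 (3 * (A.length : Int)) 1
          ++ [3 * (A.length : Int), 3 * (A.length : Int) + 1, 3 * (A.length : Int) + 2] := by
      rw [hn]
      rw [PySem.List.pyRange_one_append 0 (3 * (A.length : Int)) (3 * ((A.length : Int) + 1))
        (by positivity) (by omega)]
      congr 1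
      rw [PySem.List.pyRange_one_cons (by omega), PySem.List.pyRange_one_cons (by omega),
        PySem.List.pyRange_one_cons (by omega), PySem.List.pyRange_one_eq_nil (by omega)]
      norm_num
      omega
    rw [hsplit, List.map_append]
    have hfront : (PySem.List.pyRange 0 (3 * (A.length : Int)) 1).map
        (fun k => g (PySem.List.pyGetD (A ++ [r]) (PySem.Int.floordiv k 3) []) (PySem.Int.mod k 3))
        = (PySem.List.pyRange 0 (3 * (A.length : Int)) 1).map
        (fun k => g (PySem.List.pyGetD A (PySem.Int.floordiv k 3) []) (PySem.Int.mod k 3)) := by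
      apply List.map_congr_left
      intro k hk
      rw [PySem.List.mem_pyRange_one] at hk
      have hdpos : (0 : Int) < 3 := by norm_num
      have hq0 : 0 ≤ PySem.Int.floordiv k 3 := by
        rw [PySem.Int.floordiv_eq_ediv_of_pos hdpos]; omega
      have hqn : PySem.Int.floordiv k 3 < (A.length : Int) := by
        rw [PySem.Int.floordiv_eq_ediv_of_pos hdpos]; omega
      congr 1
      have hlt : (PySem.Int.floordiv k 3).toNat < A.length := by omega
      rw [PySem.List.pyGetD_eq_getElem (A ++ [r]) [] hq0 (by simp; omega),
          PySem.List.pyGetD_eq_getElem A [] hq0 (by exact_mod_cast hqn),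
          List.getElem_append_left hlt]
    rw [hfront, ih, List.flatMap_append]
    congr 1
    have hdpos : (0 : Int) < 3 := by norm_num
    have hr : ∀ c : Int, 0 ≤ c → c < 3 →
        PySem.List.pyGetD (A ++ [r]) (PySem.Int.floordiv (3 * (A.length : Int) + c) 3) [] = r := by
      intro c hc0 hc3
      have hq : PySem.Int.floordiv (3 * (A.length : Int) + c) 3 = (A.length : Int) := by
        rw [PySem.Int.floordiv_eq_ediv_of_pos hdpos]; omega
      rw [hq, PySem.List.pyGetD_eq_getElem (A ++ [r]) [] (by positivity) (by simp)]
      simp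
    have hm : ∀ c : Int, 0 ≤ c → c < 3 →
        PySem.Int.mod (3 * (A.length : Int) + c) 3 = c := by
      intro c hc0 hc3
      rw [PySem.Int.mod_eq_emod_of_pos hdpos]; omega
    have h0 := hr 0 (by norm_num) (by norm_num)
    have h1 := hr 1 (by norm_num) (by norm_num)
    have h2 := hr 2 (by norm_num) (by norm_num)
    have hm0 := hm 0 (by norm_num) (by norm_num)
    have hm1 := hm 1 (by norm_num) (by norm_num)
    have hm2 := hm 2 (by norm_num) (by norm_num)
    simp only [List.map_cons, List.map_nil, List.flatMap_cons, List.flatMap_nil, List.append_nil]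
    rw [show (3 * (A.length : Int) + 1) = 3 * (A.length : Int) + 1 from rfl] at h1 hm1
    rw [show (3 * (A.length : Int) + 2) = 3 * (A.length : Int) + 2 from rfl] at h2 hm2
    rw [show PySem.Int.floordiv (3 * (A.length : Int)) 3
        = PySem.Int.floordiv (3 * (A.length : Int) + 0) 3 by ring_nf] at *
    rw [show PySem.Int.mod (3 * (A.length : Int)) 3
        = PySem.Int.mod (3 * (A.length : Int) + 0) 3 by ring_nf] at *
    rw [h0, h1, h2, hm0, hm1, hm2]

-- ===== VERDICT (by name: the statement is the Claim_ definition above) =====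
theorem pixelToMatrix_spec : Claim_equal_pixelToMatrix := by
  intro A _hdom hpre
  obtain ⟨hne, hlen⟩ := hpre
  obtain ⟨a0, rest, rfl⟩ : ∃ a0 rest, A = a0 :: rest := by
    cases A with
    | nil => exact absurd rfl hne
    | cons a0 rest => exact ⟨a0, rest, rfl⟩
  unfold Spec_pixelToMatrix pixelToMatrix pixelToMatrix_alt
  simp only [PySem.List.pyGetD_zero_cons, PySem.List.len_eq]
  -- A side: index loop over the rows → fold over the rows, inner loop → channel maps, fold → flatMap
  rw [show ((a0 :: rest).length : Int) = PySem.List.len (a0 :: rest) by simp,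
    PySem.List.foldl_pyRange_zero_pyGetD (a0 :: rest) ([])
      (fun M row =>
        let v := (PySem.List.pyRange 0 ((a0.length : Int)) 1).foldl
          (fun (v : List Int × List Int × List Int) j =>
            let p := PySem.List.pyGetD row j (0, 0, 0)
            (v.1 ++ [p.1], v.2.1 ++ [p.2.1], v.2.2 ++ [p.2.2]))
          ([], [], [])
        M ++ [v.1] ++ [v.2.1] ++ [v.2.2]) []]
  -- B side: outer comprehension → flatMap over rows
  rw [show PySem.List.len (a0 :: rest) = ((a0 :: rest).length : Int) by simp]
  rw [pv_outer (a0 :: rest)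
    (fun row c => (PySem.List.pyRange 0 ((a0.length : Int)) 1).map (fun j =>
      let p := PySem.List.pyGetD row j (0, 0, 0)
      if c = 0 then p.1 else if c = 1 then p.2.1 else p.2.2))]
  -- both are now row-wise; compare row by row
  have hfold : ∀ (rows : List (List (Int × Int × Int))) (acc : List (List Int)),
      (∀ r ∈ rows, a0.length ≤ r.length) →
      rows.foldl
        (fun M row =>
          let v := (PySem.List.pyRange 0 ((a0.length : Int)) 1).foldl
            (fun (v : List Int × List Int × List Int) j =>
              let p := PySem.List.pyGetD row j (0, 0, 0)
              (v.1 ++ [p.1], v.2.1 ++ [p.2.1], v.2.2 ++ [p.2.2]))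
            ([], [], [])
          M ++ [v.1] ++ [v.2.1] ++ [v.2.2]) acc
      = acc ++ rows.flatMap (fun row =>
          [(fun c : Int => (PySem.List.pyRange 0 ((a0.length : Int)) 1).map (fun j =>
              let p := PySem.List.pyGetD row j (0, 0, 0)
              if c = 0 then p.1 else if c = 1 then p.2.1 else p.2.2)) 0,
           (fun c : Int => (PySem.List.pyRange 0 ((a0.length : Int)) 1).map (fun j =>
              let p := PySem.List.pyGetD row j (0, 0, 0)
              if c = 0 then p.1 else if c = 1 then p.2.1 else p.2.2)) 1,
           (fun c : Int => (PySem.List.pyRange 0 ((a0.length : Int)) 1).map (fun j =>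
              let p := PySem.List.pyGetD row j (0, 0, 0)
              if c = 0 then p.1 else if c = 1 then p.2.1 else p.2.2)) 2]) := by
    intro rows
    induction rows with
    | nil => intro acc _; simp
    | cons r rs ih =>
      intro acc hall
      have hr : a0.length ≤ r.length := hall r (by simp)
      simp only [List.foldl_cons, List.flatMap_cons]
      rw [ih _ (fun x hx => hall x (by simp [hx])), pv_inner r a0.length hr]
      have e0 := pv_takeMap r a0.length hr (·.1)
      have e1 := pv_takeMap r a0.length hr (·.2.1)
      have e2 := pv_takeMap r a0.length hr (·.2.2)
      simp only [e0.symm, e1.symm, e2.symm]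
      simp [List.append_assoc]
  rw [hfold (a0 :: rest) [] (by intro r hr; simpa using hlen r (by simpa using hr))]
  simp
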